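-- pv_equiv track=rewrite | github.com/DentaMind/SmartDentalAI | backend/api/services/eprescription_service.py | _check_age_contraindication
-- ===== SOURCE A (Python) =====
-- from typing import Dict, List, Optional, Any, Tuple
--
-- def _check_age_contraindication(
--
--     age: int,
--     medication_name: str
-- ) -> Optional[str]:
--     """Check for age-related contraindications with a medication"""
--     med_lower = medication_name.lower()
--
--     # Pediatric concerns (under 18)
--     if age < 18:
--         if "aspirin" in med_lower:
--             return "CRITICAL: Aspirin not recommended in children/adolescents due to risk of Reye's syndrome"
--
--         if any(med in med_lower for med in ["ibuprofen", "acetaminophen"]):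
--             return f"Use pediatric dosing for patients under 18 (current age: {age})"
--
--         if any(med in med_lower for med in ["hydrocodone", "oxycodone", "codeine"]):
--             return f"CRITICAL: Opioids generally not recommended for patients under 18 (current age: {age})"
--
--         if "tetracycline" in med_lower or "doxycycline" in med_lower:
--             return "May cause permanent tooth discoloration in children under 8"
--
--     # Geriatric concerns (over 65)
--     if age > 65:
--         if any(med in med_lower for med in ["hydrocodone", "oxycodone", "codeine", "tramadol"]):
--             return f"Use reduced dosing for elderly patients (current age: {age}) - increased risk of side effects"
--
--         if any(med in med_lower for med in ["diazepam", "alprazolam", "lorazepam"]):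
--             return f"Benzodiazepines should be used with caution in elderly (current age: {age}) - increased risk of falls"
--
--         if any(med in med_lower for med in ["diphenhydramine", "benadryl"]):
--             return "Anticholinergics may cause confusion in elderly patients"
--
--         if "nsaid" in med_lower or any(med in med_lower for med in ["ibuprofen", "naproxen", "meloxicam"]):
--             return "NSAIDs in elderly patients (>65) have increased risk of GI bleeding and renal effects"
--
--     return None
-- ===== SOURCE B (Python) =====
-- # Different decomposition: instead of an early-return branch chain, one comprehension
-- # collects ALL matched severity ranks from a flat keyword index, then min() selects
-- # the most severe (= first in A's rule order); the message is assembled from parts.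
-- _KEYWORDS = [
--     ("aspirin", "ped", 0),
--     ("ibuprofen", "ped", 1), ("acetaminophen", "ped", 1),
--     ("hydrocodone", "ped", 2), ("oxycodone", "ped", 2), ("codeine", "ped", 2),
--     ("tetracycline", "ped", 3), ("doxycycline", "ped", 3),
--     ("hydrocodone", "ger", 0), ("oxycodone", "ger", 0), ("codeine", "ger", 0), ("tramadol", "ger", 0),
--     ("diazepam", "ger", 1), ("alprazolam", "ger", 1), ("lorazepam", "ger", 1),
--     ("diphenhydramine", "ger", 2), ("benadryl", "ger", 2),
--     ("nsaid", "ger", 3), ("ibuprofen", "ger", 3), ("naproxen", "ger", 3), ("meloxicam", "ger", 3),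
-- ]
--
-- # (prefix, suffix): suffix is None when the message does not mention the age,
-- # otherwise the message is prefix + str(age) + suffix.
-- _MESSAGES = {
--     "ped": [
--         ("CRITICAL: Aspirin not recommended in children/adolescents due to risk of Reye's syndrome", None),
--         ("Use pediatric dosing for patients under 18 (current age: ", ")"),
--         ("CRITICAL: Opioids generally not recommended for patients under 18 (current age: ", ")"),
--         ("May cause permanent tooth discoloration in children under 8", None),
--     ],
--     "ger": [
--         ("Use reduced dosing for elderly patients (current age: ", ") - increased risk of side effects"),
--         ("Benzodiazepines should be used with caution in elderly (current age: ", ") - increased risk of falls"),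
--         ("Anticholinergics may cause confusion in elderly patients", None),
--         ("NSAIDs in elderly patients (>65) have increased risk of GI bleeding and renal effects", None),
--     ],
-- }
--
-- def _check_age_contraindication(age, medication_name):
--     med = medication_name.lower()
--     band = "ped" if age < 18 else "ger" if age > 65 else None
--     if band is None:
--         return None
--     ranks = {rank for kw, b, rank in _KEYWORDS if b == band and kw in med}
--     if not ranks:
--         return None
--     pre, suf = _MESSAGES[band][min(ranks)]
--     return pre if suf is None else f"{pre}{age}{suf}"
-- ===== Notes on version B (the rewrite author's own statement) =====
-- stated objective: alternative
-- what changed: Instead of an early-return chain of age-guarded if-branches, B collects the set of ALL matched severity ranks in one comprehension over a flat keyword index and then picks the message by min(ranks), assembling age-bearing messages from (prefix, suffix) parts.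
import Mathlib
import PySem

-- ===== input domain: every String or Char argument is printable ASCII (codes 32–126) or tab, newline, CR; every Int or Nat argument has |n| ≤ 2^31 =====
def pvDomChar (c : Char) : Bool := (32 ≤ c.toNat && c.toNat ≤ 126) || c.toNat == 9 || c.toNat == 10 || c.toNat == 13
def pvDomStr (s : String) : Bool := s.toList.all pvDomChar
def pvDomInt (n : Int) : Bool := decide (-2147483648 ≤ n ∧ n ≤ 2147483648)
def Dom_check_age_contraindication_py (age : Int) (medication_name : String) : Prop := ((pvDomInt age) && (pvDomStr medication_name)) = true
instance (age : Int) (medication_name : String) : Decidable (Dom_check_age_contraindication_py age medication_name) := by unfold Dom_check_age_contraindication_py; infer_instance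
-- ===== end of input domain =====

-- B replaces A's early-return branch chain by collecting ALL matched severity ranks
-- from a flat keyword index and selecting the winner with min (objective: alternative).

-- ===== PORT A =====
def check_age_contraindication_py (age : Int) (medication_name : String) : Option String :=
  let med_lower := PySem.Str.lower medication_name
  -- the geriatric block (reached whether or not age < 18, as in the Python fall-through)
  let geriatric : Option String :=
    if age > 65 then
      if ["hydrocodone", "oxycodone", "codeine", "tramadol"].any (fun med => PySem.Str.isIn med med_lower) then
        some ("Use reduced dosing for elderly patients (current age: " ++ PySem.Int.toStr age ++ ") - increased risk of side effects")
      else if ["diazepam", "alprazolam", "lorazepam"].any (fun med => PySem.Str.isIn med med_lower) then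
        some ("Benzodiazepines should be used with caution in elderly (current age: " ++ PySem.Int.toStr age ++ ") - increased risk of falls")
      else if ["diphenhydramine", "benadryl"].any (fun med => PySem.Str.isIn med med_lower) then
        some "Anticholinergics may cause confusion in elderly patients"
      else if PySem.Str.isIn "nsaid" med_lower || ["ibuprofen", "naproxen", "meloxicam"].any (fun med => PySem.Str.isIn med med_lower) then
        some "NSAIDs in elderly patients (>65) have increased risk of GI bleeding and renal effects"
      else none
    else none
  if age < 18 then
    if PySem.Str.isIn "aspirin" med_lower then
      some "CRITICAL: Aspirin not recommended in children/adolescents due to risk of Reye's syndrome"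
    else if ["ibuprofen", "acetaminophen"].any (fun med => PySem.Str.isIn med med_lower) then
      some ("Use pediatric dosing for patients under 18 (current age: " ++ PySem.Int.toStr age ++ ")")
    else if ["hydrocodone", "oxycodone", "codeine"].any (fun med => PySem.Str.isIn med med_lower) then
      some ("CRITICAL: Opioids generally not recommended for patients under 18 (current age: " ++ PySem.Int.toStr age ++ ")")
    else if PySem.Str.isIn "tetracycline" med_lower || PySem.Str.isIn "doxycycline" med_lower then
      some "May cause permanent tooth discoloration in children under 8"
    else geriatric
  else geriatric

-- ===== PORT B =====
-- Source B's flat keyword index: (keyword, band, severity rank)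
def pvKeywords : List (String × String × Int) :=
  [ ("aspirin", "ped", 0),
    ("ibuprofen", "ped", 1), ("acetaminophen", "ped", 1),
    ("hydrocodone", "ped", 2), ("oxycodone", "ped", 2), ("codeine", "ped", 2),
    ("tetracycline", "ped", 3), ("doxycycline", "ped", 3),
    ("hydrocodone", "ger", 0), ("oxycodone", "ger", 0), ("codeine", "ger", 0), ("tramadol", "ger", 0),
    ("diazepam", "ger", 1), ("alprazolam", "ger", 1), ("lorazepam", "ger", 1),
    ("diphenhydramine", "ger", 2), ("benadryl", "ger", 2),
    ("nsaid", "ger", 3), ("ibuprofen", "ger", 3), ("naproxen", "ger", 3), ("meloxicam", "ger", 3) ]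

-- Source B's message parts per band: (prefix, optional suffix); with a suffix the
-- message is prefix + str(age) + suffix (port of the f-string f"{pre}{age}{suf}")
def pvMessages : PySem.Dict String (List (String × Option String)) :=
  PySem.Dict.ofList
  [ ("ped",
     [ ("CRITICAL: Aspirin not recommended in children/adolescents due to risk of Reye's syndrome", none),
       ("Use pediatric dosing for patients under 18 (current age: ", some ")"),
       ("CRITICAL: Opioids generally not recommended for patients under 18 (current age: ", some ")"),
       ("May cause permanent tooth discoloration in children under 8", none) ]),
    ("ger",
     [ ("Use reduced dosing for elderly patients (current age: ", some ") - increased risk of side effects"),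
       ("Benzodiazepines should be used with caution in elderly (current age: ", some ") - increased risk of falls"),
       ("Anticholinergics may cause confusion in elderly patients", none),
       ("NSAIDs in elderly patients (>65) have increased risk of GI bleeding and renal effects", none) ]) ]

def check_age_contraindication_py_alt (age : Int) (medication_name : String) : Option String :=
  let med := PySem.Str.lower medication_name
  let band : Option String := if age < 18 then some "ped" else if age > 65 then some "ger" else none
  match band with
  | none => none
  | some b =>
    let ranks : PySem.Set Int :=
      PySem.Set.ofList ((pvKeywords.filter (fun e => e.2.1 == b && PySem.Str.isIn e.1 med)).map (fun e => e.2.2))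
    match PySem.List.min? ranks (fun x => x) with
    | none => none                                      -- empty set: no match
    | some r =>
      match PySem.Dict.get? pvMessages b with
      | none => none                                    -- unreachable: both bands are keys
      | some msgs =>
        match PySem.List.pyGet? msgs r with
        | none => none                                  -- unreachable: ranks are valid indices
        | some (pre, suf) =>
          match suf with
          | none => some pre
          | some suf => some (pre ++ PySem.Int.toStr age ++ suf)

-- ===== PRECONDITION & SPEC =====
def Spec_check_age_contraindication_py (age : Int) (medication_name : String) (out : Option String) : Prop := out = check_age_contraindication_py_alt age medication_name
instance (age : Int) (medication_name : String) (out : Option String) : Decidable (Spec_check_age_contraindication_py age medication_name out) := by unfold Spec_check_age_contraindication_py; infer_instance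

-- ===== CLAIM (what is proved, stated in full; the proofs are below) =====
def Claim_equal_check_age_contraindication_py : Prop := ∀ (age : Int) (medication_name : String), Dom_check_age_contraindication_py age medication_name → Spec_check_age_contraindication_py age medication_name (check_age_contraindication_py age medication_name)

-- ===== LEMMAS AND PROOFS =====
-- filter-then-map over a cons, in a form whose repeated rewriting is linear in the list
theorem pv_map_filter_cons {a b : Type} (p : a -> Bool) (f : a -> b) (x : a) (xs : List a) :
    (List.filter p (x :: xs)).map f = (if p x then [f x] else []) ++ (List.filter p xs).map f := by
  by_cases h : p x = true <;> simp [h]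

-- the min of the matched pediatric ranks equals A's first-match cascade
theorem pv_min_ped (b1 b2 b3 b4 b5 b6 b7 b8 : Bool) :
    PySem.List.min? (PySem.Set.ofList ((if b1 then [(0:Int)] else []) ++ ((if b2 then [(1:Int)] else []) ++ ((if b3 then [(1:Int)] else []) ++ ((if b4 then [(2:Int)] else []) ++ ((if b5 then [(2:Int)] else []) ++ ((if b6 then [(2:Int)] else []) ++ ((if b7 then [(3:Int)] else []) ++ ((if b8 then [(3:Int)] else []) ++ ([] : List Int)))))))))) (fun x => x)
    = (if b1 then some (0:Int)
       else if b2 || b3 then some 1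
       else if b4 || (b5 || b6) then some 2
       else if b7 || b8 then some 3 else none) := by
  revert b1 b2 b3 b4 b5 b6 b7 b8
  decide

-- the min of the matched geriatric ranks equals A's first-match cascade
theorem pv_min_ger (b1 b2 b3 b4 b5 b6 b7 b8 b9 b10 b11 b12 b13 : Bool) :
    PySem.List.min? (PySem.Set.ofList ((if b1 then [(0:Int)] else []) ++ ((if b2 then [(0:Int)] else []) ++ ((if b3 then [(0:Int)] else []) ++ ((if b4 then [(0:Int)] else []) ++ ((if b5 then [(1:Int)] else []) ++ ((if b6 then [(1:Int)] else []) ++ ((if b7 then [(1:Int)] else []) ++ ((if b8 then [(2:Int)] else []) ++ ((if b9 then [(2:Int)] else []) ++ ((if b10 then [(3:Int)] else []) ++ ((if b11 then [(3:Int)] else []) ++ ((if b12 then [(3:Int)] else []) ++ ((if b13 then [(3:Int)] else []) ++ ([] : List Int))))))))))))))) (fun x => x)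
    = (if b1 || (b2 || (b3 || b4)) then some (0:Int)
       else if b5 || (b6 || b7) then some 1
       else if b8 || b9 then some 2
       else if b10 || (b11 || (b12 || b13)) then some 3 else none) := by
  revert b1 b2 b3 b4 b5 b6 b7 b8 b9 b10 b11 b12 b13
  decide

-- ===== VERDICT (by name: the statement is the Claim_ definition above) =====
theorem check_age_contraindication_py_spec : Claim_equal_check_age_contraindication_py := by
  intro age medication_name _
  unfold Spec_check_age_contraindication_py check_age_contraindication_py check_age_contraindication_py_alt pvKeywords pvMessages
  by_cases h18 : age < 18 <;> by_cases h65 : age > 65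
  · omega
  · -- pediatric band
    simp only [h18, h65, if_true, if_false]
    simp only [pv_map_filter_cons, List.filter_nil, List.map_nil, beq_self_eq_true,
      String.reduceBEq, Bool.true_and, Bool.false_and, Bool.false_eq_true, if_false,
      List.nil_append, List.any_cons, List.any_nil, Bool.or_false]
    rw [pv_min_ped]
    split_ifs <;> rfl
  · -- geriatric band
    simp only [h18, h65, if_true, if_false]
    simp only [pv_map_filter_cons, List.filter_nil, List.map_nil, beq_self_eq_true,
      String.reduceBEq, Bool.true_and, Bool.false_and, Bool.false_eq_true, if_false,
      List.nil_append, List.any_cons, List.any_nil, Bool.or_false]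
    rw [pv_min_ger]
    split_ifs <;> rfl
  · -- neither band: both return none
    simp only [h18, h65, if_false]
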